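-- pv_equiv track=rewrite | github.com/bin0o/graphjs | preProcesser.py | convert_middleware_to_calls
-- ===== SOURCE A (Python) =====
-- def convert_middleware_to_calls(middleware_items, method_func_name, route_params, has_handler):
--     """Convert middleware items to function calls"""
--     if not middleware_items:
--         if has_handler:
--             # No middleware, call method function directly
--             method_params = ['req', 'res']
--             method_params.extend(route_params)
--             return [f"{method_func_name}({', '.join(method_params)});"]
--         else:
--             return ["// No middleware or handler defined"]
--
--     # If there's no handler, execute the middleware directly without chaining
--     if not has_handler:
--         current_call = f"{middleware_items[-1]}(req, res)"
--         middleware_items.pop()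
--     else:
--         # Build the chain from right to left (innermost to outermost) when there's a handler
--         method_params = ['req', 'res']
--         method_params.extend(route_params)
--         current_call = f"{method_func_name}({', '.join(method_params)})"
--
--     for middleware_item in reversed(middleware_items):
--         if '(' in middleware_item:
--             # Middleware with parameters - use the complete call as is
--             current_call = f"{middleware_item}(req, res, () => {current_call})"
--         else:
--             # Simple middleware name - call with req, res
--             current_call = f"{middleware_item}(req, res, () => {current_call})"
--     return [f"{current_call};"]
-- ===== SOURCE B (Python) =====
-- def convert_middleware_to_calls(middleware_items, method_func_name, route_params, has_handler):
--     """Convert middleware items to function calls (flat prefix + closers construction)."""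
--     if not middleware_items and not has_handler:
--         return ["// No middleware or handler defined"]
--     if has_handler:
--         inner = f"{method_func_name}({', '.join(['req', 'res'] + route_params)})"
--     else:
--         inner = f"{middleware_items.pop()}(req, res)"
--     openers = [f"{mw}(req, res, () => " for mw in middleware_items]
--     return [''.join(openers) + inner + ')' * len(openers) + ';']
-- ===== Notes on version B (the rewrite author's own statement) =====
-- stated objective: simpler
-- what changed: Replaces the reversed-iteration accumulator that rebuilds the whole call string at every step with a flat forward construction (joined list of 'mw(req, res, () => ' openers, the inner call, then a run of closing parentheses), merges the empty-list handler case into that general formula, and drops A's dead '(' in mw branch whose two arms are identical.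
import Mathlib
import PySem

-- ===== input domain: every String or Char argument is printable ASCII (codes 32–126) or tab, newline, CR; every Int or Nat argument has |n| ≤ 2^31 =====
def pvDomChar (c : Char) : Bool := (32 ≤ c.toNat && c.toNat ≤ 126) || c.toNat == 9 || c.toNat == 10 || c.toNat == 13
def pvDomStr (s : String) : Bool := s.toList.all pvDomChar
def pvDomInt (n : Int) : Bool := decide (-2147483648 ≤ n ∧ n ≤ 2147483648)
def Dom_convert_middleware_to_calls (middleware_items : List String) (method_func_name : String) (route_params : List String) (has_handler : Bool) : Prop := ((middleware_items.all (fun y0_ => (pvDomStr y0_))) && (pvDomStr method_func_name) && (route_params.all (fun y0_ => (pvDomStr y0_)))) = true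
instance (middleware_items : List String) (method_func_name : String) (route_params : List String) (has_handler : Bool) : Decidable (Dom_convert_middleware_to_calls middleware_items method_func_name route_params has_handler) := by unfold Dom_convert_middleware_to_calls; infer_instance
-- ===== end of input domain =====

-- B builds the output flat and forward (joined list of openers + inner call + run of ')'), merging the
-- empty-list handler case into that general formula, instead of A's reversed-iteration accumulator;
-- equivalence is about the RETURN value (both Source A and Source B pop middleware_items in place in the
-- no-handler case). Objective: simpler.

-- ===== PORT A =====
def convert_middleware_to_calls (middleware_items : List String) (method_func_name : String) (route_params : List String) (has_handler : Bool) : List String :=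
  if middleware_items.isEmpty then
    if has_handler then
      [method_func_name ++ "(" ++ PySem.Str.join ", " (["req", "res"] ++ route_params) ++ ");"]
    else
      ["// No middleware or handler defined"]
  else
    -- current_call and the (possibly popped) list the loop runs over
    let current_call :=
      if !has_handler then
        ((PySem.List.pyGet? middleware_items (-1)).getD "") ++ "(req, res)"   -- middleware_items[-1]
      else
        method_func_name ++ "(" ++ PySem.Str.join ", " (["req", "res"] ++ route_params) ++ ")"
    let items := if !has_handler then middleware_items.dropLast else middleware_items   -- .pop()
    let final := items.reverse.foldl
      (fun cur mw =>
        if PySem.Str.isIn "(" mw then mw ++ "(req, res, () => " ++ cur ++ ")"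
        else mw ++ "(req, res, () => " ++ cur ++ ")")
      current_call
    [final ++ ";"]

-- ===== PORT B =====
def convert_middleware_to_calls_alt (middleware_items : List String) (method_func_name : String) (route_params : List String) (has_handler : Bool) : List String :=
  if middleware_items.isEmpty && !has_handler then
    ["// No middleware or handler defined"]
  else
    let inner :=
      if has_handler then
        method_func_name ++ "(" ++ PySem.Str.join ", " (["req", "res"] ++ route_params) ++ ")"
      else
        -- middleware_items.pop(): the value is the last element; what remains is wrapped below
        ((PySem.List.pyGet? middleware_items (-1)).getD "") ++ "(req, res)"
    let remaining := if has_handler then middleware_items else middleware_items.dropLast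
    let openers := remaining.map (fun mw => mw ++ "(req, res, () => ")
    [PySem.Str.join "" openers ++ inner ++ String.ofList (List.replicate openers.length ')') ++ ";"]

-- ===== PRECONDITION & SPEC =====
def Spec_convert_middleware_to_calls (middleware_items : List String) (method_func_name : String) (route_params : List String) (has_handler : Bool) (out : List String) : Prop := out = convert_middleware_to_calls_alt middleware_items method_func_name route_params has_handler
instance (middleware_items : List String) (method_func_name : String) (route_params : List String) (has_handler : Bool) (out : List String) : Decidable (Spec_convert_middleware_to_calls middleware_items method_func_name route_params has_handler out) := by unfold Spec_convert_middleware_to_calls; infer_instance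

-- ===== CLAIM =====
def Claim_equal_convert_middleware_to_calls : Prop := ∀ (middleware_items : List String) (method_func_name : String) (route_params : List String) (has_handler : Bool), Dom_convert_middleware_to_calls middleware_items method_func_name route_params has_handler → Spec_convert_middleware_to_calls middleware_items method_func_name route_params has_handler (convert_middleware_to_calls middleware_items method_func_name route_params has_handler)

-- ===== LEMMAS AND PROOFS =====
-- sep = "": joining is plain concatenation, one element at a time
theorem join_nil_cons (p : List Char) (rest : List (List Char)) :
    PySem.Chars.join [] (p :: rest) = p ++ PySem.Chars.join [] rest := by
  cases rest with
  | nil => simp [PySem.Chars.join_singleton, PySem.Chars.join_nil]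
  | cons q r => rw [PySem.Chars.join_cons_cons]; simp

-- A's inside-out accumulation (as a foldr, with a trailing tail) equals B's openers ++ inner ++ closers
theorem chain_eq_prefix_suffix (l : List String) (inner tail : String) :
    List.foldr (fun x y => x ++ ("(req, res, () => " ++ (y ++ ")"))) inner l ++ tail
    = PySem.Str.join "" (l.map (fun mw => mw ++ "(req, res, () => "))
        ++ (inner ++ (String.ofList (List.replicate l.length ')') ++ tail)) := by
  induction l generalizing tail with
  | nil =>
      rw [← String.toList_inj]
      simp [PySem.Str.toList_join, PySem.Chars.join_nil]
  | cons a t ih =>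
      have step : List.foldr (fun x y => x ++ ("(req, res, () => " ++ (y ++ ")"))) inner (a :: t) ++ tail
          = a ++ "(req, res, () => " ++ (List.foldr (fun x y => x ++ ("(req, res, () => " ++ (y ++ ")"))) inner t ++ (")" ++ tail)) := by
        simp [String.append_assoc]
      rw [step, ih (")" ++ tail)]
      rw [← String.toList_inj]
      simp only [List.map_cons, List.length_cons, List.replicate_succ',
        String.toList_append, PySem.Str.toList_join, String.toList_ofList]
      have h0 : ("" : String).toList = [] := rfl
      rw [h0, join_nil_cons]
      simp

-- ===== VERDICT =====
theorem convert_middleware_to_calls_spec : Claim_equal_convert_middleware_to_calls := by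
  intro mi mf rp hh _
  unfold Spec_convert_middleware_to_calls convert_middleware_to_calls convert_middleware_to_calls_alt
  by_cases he : mi.isEmpty
  · rw [List.isEmpty_iff.mp he]
    have h : (");" : String) = ")" ++ ";" := rfl
    cases hh <;> simp [h, String.append_assoc, PySem.Str.join, PySem.Chars.join_nil]
  · cases hh <;>
      simp [he, List.foldl_reverse, chain_eq_prefix_suffix, String.append_assoc,
        List.map_dropLast, List.length_dropLast]
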